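-- pv_equiv track=rewrite | github.com/kangkukjin/indiebizOS | backend/ibl_parser.py | _count_brace_depth
-- ===== SOURCE A (Python) =====
-- def _count_brace_depth(text: str) -> int:
--     """텍스트 내 { } 균형 계산 (문자열 내부 무시)"""
--     depth = 0
--     in_string = False
--     string_char = None
--     i = 0
--     while i < len(text):
--         ch = text[i]
--         if not in_string:
--             if ch == '"' or ch == "'":
--                 in_string = True
--                 string_char = ch
--             elif ch == '{':
--                 depth += 1
--             elif ch == '}':
--                 depth -= 1
--         else:
--             if ch == '\\' and i + 1 < len(text):
--                 i += 1  # 이스케이프 건너뛰기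
--             elif ch == string_char:
--                 in_string = False
--         i += 1
--     return depth
-- ===== SOURCE B (Python) =====
-- def _find_quote(text):
--     j1 = text.find('"')
--     j2 = text.find("'")
--     if j1 == -1 and j2 == -1:
--         return None
--     if j2 == -1 or (j1 != -1 and j1 < j2):
--         return (j1, '"')
--     return (j2, "'")
--
--
-- def _find_close(s, q):
--     # index just past the closing quote q in s, or None; a quote preceded by an
--     # odd-length run of backslashes is escaped.
--     k = s.find(q)
--     while k != -1:
--         b = k
--         while b > 0 and s[b - 1] == '\\':
--             b -= 1
--         if (k - b) % 2 == 0: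
--             return k + 1
--         k = s.find(q, k + 1)
--     return None
--
--
-- def _count_brace_depth(text: str) -> int:
--     depth = 0
--     s = text
--     while True:
--         fq = _find_quote(s)
--         if fq is None:
--             return depth + s.count('{') - s.count('}')
--         j, q = fq
--         head = s[:j]
--         depth += head.count('{') - head.count('}')
--         rest = s[j + 1:]
--         e = _find_close(rest, q)
--         if e is None:
--             return depth
--         s = rest[e:]
-- ===== Notes on version B (the rewrite author's own statement) =====
-- stated objective: faster
-- what changed: Replaces A's per-character in_string/string_char/escape state machine with staged find/slice/count passes: str.find locates the next quote, str.count tallies the braces of each quote-free chunk at once, and the closing quote is resolved by the parity of the backslash run before each candidate quote.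
import Mathlib
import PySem

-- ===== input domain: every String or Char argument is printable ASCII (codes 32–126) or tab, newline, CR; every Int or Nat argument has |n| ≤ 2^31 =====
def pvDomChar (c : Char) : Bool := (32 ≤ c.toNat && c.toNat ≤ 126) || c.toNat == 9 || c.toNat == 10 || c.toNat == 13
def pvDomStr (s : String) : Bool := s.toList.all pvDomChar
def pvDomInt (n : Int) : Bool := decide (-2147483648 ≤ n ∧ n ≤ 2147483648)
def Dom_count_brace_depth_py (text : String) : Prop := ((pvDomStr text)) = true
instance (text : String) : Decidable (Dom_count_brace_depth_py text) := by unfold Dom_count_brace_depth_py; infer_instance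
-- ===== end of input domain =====

-- B replaces A's per-character in_string/string_char/escape state machine by staged
-- find/slice/count passes (find next quote, count braces of the quote-free chunk,
-- resolve the closing quote by backslash-run parity); measurably faster in Python by
-- a constant factor (bulk str.find/str.count instead of a per-character loop).

-- ===== PORT A =====
-- A's while loop: state (depth, in_string, string_char); the escape branch
-- 'i += 1; i += 1' consumes ch and the following char: rest.tail.
def pvLoopA : List Char → Int → Bool → Option Char → Int
  | [], depth, _, _ => depth
  | ch :: rest, depth, inStr, sc =>
    if inStr = false then
      if ch = '"' ∨ ch = '\'' then pvLoopA rest depth true (some ch)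
      else if ch = '{' then pvLoopA rest (depth + 1) false sc
      else if ch = '}' then pvLoopA rest (depth - 1) false sc
      else pvLoopA rest depth false sc
    else
      if ch = '\\' ∧ rest ≠ [] then pvLoopA rest.tail depth inStr sc
      else if some ch = sc then pvLoopA rest depth false sc
      else pvLoopA rest depth inStr sc
termination_by l => l.length
decreasing_by all_goals (simp; try omega)

def count_brace_depth_py (text : String) : Int :=
  pvLoopA text.toList 0 false none

-- ===== PORT B =====
-- port of str.find(q): index of first occurrence, none for Python's -1
def pvIdx (q : Char) : List Char → Option Nat
  | [] => none
  | c :: t => if c = q then some 0 else (pvIdx q t).map (· + 1)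

theorem pvIdx_lt_length (q : Char) : ∀ (l : List Char) (j : Nat), pvIdx q l = some j → j < l.length := by
  intro l
  induction l with
  | nil => intro j h; simp [pvIdx] at h
  | cons c t ih =>
    intro j h
    by_cases hc : c = q
    · simp [pvIdx, hc] at h; simp; omega
    · simp [pvIdx, hc] at h
      obtain ⟨j', hj', rfl⟩ := h
      have := ih j' hj'
      simp; omega

-- the b-loop 'b = k; while b > 0 and s[b-1] == '\\': b -= 1' computes k - b =
-- number of trailing backslashes of s[:k]; ported as pvTrailBS (s.take k).
def pvLeadBS : List Char → Nat
  | [] => 0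
  | c :: t => if c = '\\' then pvLeadBS t + 1 else 0

def pvTrailBS (l : List Char) : Nat := pvLeadBS l.reverse

-- Source B's _find_close: k-search loop 's.find(q, k)' (= pvIdx on s.drop k, offset k),
-- backslash-run parity decides escaped vs closing.
def pvFindClose (q : Char) (s : List Char) (k : Nat) : Option Nat :=
  match h : pvIdx q (s.drop k) with
  | none => none
  | some j =>
    if pvTrailBS (s.take (k + j)) % 2 = 0 then some (k + j + 1)
    else pvFindClose q s (k + j + 1)
termination_by s.length - k
decreasing_by
  have h1 := pvIdx_lt_length q (s.drop k) j h
  simp at h1; omega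

-- Source B's _find_quote: two str.find calls and the min-selection branch chain
def pvFindQuote (l : List Char) : Option (Nat × Char) :=
  match pvIdx '"' l, pvIdx '\'' l with
  | none, none => none
  | some j1, none => some (j1, '"')
  | none, some j2 => some (j2, '\'')
  | some j1, some j2 => if j1 < j2 then some (j1, '"') else some (j2, '\'')

theorem pvFindQuote_pos (l : List Char) (p : Nat × Char) (h : pvFindQuote l = some p) :
    0 < l.length := by
  cases l with
  | nil => simp [pvFindQuote, pvIdx] at h
  | cons c t => simp

-- head.count('{') - head.count('}')
def pvCountB (l : List Char) : Int := (l.count '{' : Int) - (l.count '}' : Int)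

-- Source B's outer while loop: find next quote, count braces of the chunk before it,
-- skip the string literal via pvFindClose, continue on the remainder.
def pvLoopB (l : List Char) (depth : Int) : Int :=
  match h : pvFindQuote l with
  | none => depth + pvCountB l
  | some (j, q) =>
    let depth' := depth + pvCountB (l.take j)
    match pvFindClose q (l.drop (j + 1)) 0 with
    | none => depth'
    | some e => pvLoopB ((l.drop (j + 1)).drop e) depth'
termination_by l.length
decreasing_by
  have := pvFindQuote_pos l (j, q) h
  simp; omega

def count_brace_depth_py_alt (text : String) : Int :=
  pvLoopB text.toList 0

-- ===== PRECONDITION & SPEC =====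
def Spec_count_brace_depth_py (text : String) (out : Int) : Prop := out = count_brace_depth_py_alt text
instance (text : String) (out : Int) : Decidable (Spec_count_brace_depth_py text out) := by unfold Spec_count_brace_depth_py; infer_instance

-- ===== CLAIM (what is proved, stated in full; the proofs are below) =====
def Claim_equal_count_brace_depth_py : Prop := ∀ (text : String), Dom_count_brace_depth_py text → Spec_count_brace_depth_py text (count_brace_depth_py text)

-- ===== LEMMAS AND PROOFS =====

-- non-dependent one-step unfoldings of the two well-founded recursions
theorem pvFindClose_eq (q : Char) (s : List Char) (k : Nat) :
    pvFindClose q s k =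
      match pvIdx q (s.drop k) with
      | none => none
      | some j =>
        if pvTrailBS (s.take (k + j)) % 2 = 0 then some (k + j + 1)
        else pvFindClose q s (k + j + 1) := by
  rw [pvFindClose.eq_def]
  split <;> simp [*]

theorem pvFindClose_none (q : Char) (s : List Char) (k : Nat)
    (h : pvIdx q (s.drop k) = none) : pvFindClose q s k = none := by
  rw [pvFindClose_eq, h]

theorem pvFindClose_some (q : Char) (s : List Char) (k j : Nat)
    (h : pvIdx q (s.drop k) = some j) :
    pvFindClose q s k =
      if pvTrailBS (s.take (k + j)) % 2 = 0 then some (k + j + 1)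
      else pvFindClose q s (k + j + 1) := by
  rw [pvFindClose_eq, h]

theorem pvLoopB_eq (l : List Char) (depth : Int) :
    pvLoopB l depth =
      match pvFindQuote l with
      | none => depth + pvCountB l
      | some (j, q) =>
        match pvFindClose q (l.drop (j + 1)) 0 with
        | none => depth + pvCountB (l.take j)
        | some e => pvLoopB ((l.drop (j + 1)).drop e) (depth + pvCountB (l.take j)) := by
  rw [pvLoopB.eq_def]
  split <;> simp [*]

-- proof-only intermediate: the in-string skip machine matching A's stepping;
-- result = index just past the closing quote, none if unterminated.
def pvSkipM (q : Char) : List Char → Option Nat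
  | [] => none
  | c :: t =>
    if c = '\\' ∧ t ≠ [] then (pvSkipM q t.tail).map (· + 2)
    else if c = q then some 1
    else (pvSkipM q t).map (· + 1)
termination_by l => l.length
decreasing_by all_goals (simp; try omega)

-- A's loop inside a string equals: skip to past the closing quote, resume outside.
theorem loopA_inString : ∀ (n : Nat) (l : List Char), l.length ≤ n → ∀ (depth : Int) (q : Char),
    pvLoopA l depth true (some q) =
      (match pvSkipM q l with
       | none => depth
       | some e => pvLoopA (l.drop e) depth false (some q)) := by
  intro n
  induction n with
  | zero =>
    intro l hl
    have : l = [] := List.length_eq_zero_iff.mp (Nat.le_zero.mp hl)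
    subst this
    intro depth q
    simp [pvLoopA, pvSkipM]
  | succ n ih =>
    intro l hl
    cases l with
    | nil => intro depth q; simp [pvLoopA, pvSkipM]
    | cons c rest =>
      intro depth q
      have hrest : rest.length ≤ n := by simpa using Nat.succ_le_succ_iff.mp hl
      by_cases h1 : c = '\\' ∧ rest ≠ []
      · obtain ⟨rfl, hr⟩ := h1
        cases rest with
        | nil => exact absurd rfl hr
        | cons r t =>
          have htail : t.length ≤ n := by simp at hrest; omega
          have hskip : pvSkipM q ('\\' :: r :: t) = (pvSkipM q t).map (· + 2) := by
            simp only [pvSkipM]; simp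
          have hA : pvLoopA ('\\' :: r :: t) depth true (some q) = pvLoopA t depth true (some q) := by
            simp only [pvLoopA]; simp
          rw [hA, hskip, ih t htail depth q]
          rcases pvSkipM q t with _ | e <;> simp
      · by_cases h2 : c = q
        · subst h2
          have hskip : pvSkipM c (c :: rest) = some 1 := by
            simp only [pvSkipM]
            rw [if_neg h1]
            simp
          have hA : pvLoopA (c :: rest) depth true (some c) = pvLoopA rest depth false (some c) := by
            simp only [pvLoopA]
            simp [h1]
          rw [hA, hskip]
          simp
        · have hskip : pvSkipM q (c :: rest) = (pvSkipM q rest).map (· + 1) := by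
            simp only [pvSkipM]; simp [h1, h2]
          have hA : pvLoopA (c :: rest) depth true (some q) = pvLoopA rest depth true (some q) := by
            simp only [pvLoopA]; simp [h1, h2]
          rw [hA, hskip, ih rest hrest depth q]
          rcases pvSkipM q rest with _ | e <;> simp

-- pvIdx characterisations
theorem pvIdx_none_iff (q : Char) (l : List Char) : pvIdx q l = none ↔ q ∉ l := by
  induction l with
  | nil => simp [pvIdx]
  | cons c t ih =>
    by_cases hc : c = q
    · subst hc; simp [pvIdx]
    · simp [pvIdx, hc, Ne.symm hc, ih]

theorem pvIdx_some_decomp (q : Char) : ∀ (l : List Char) (j : Nat), pvIdx q l = some j →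
    l = l.take j ++ q :: l.drop (j + 1) ∧ q ∉ l.take j ∧ j < l.length := by
  intro l
  induction l with
  | nil => intro j h; simp [pvIdx] at h
  | cons c t ih =>
    intro j h
    by_cases hc : c = q
    · subst hc
      simp [pvIdx] at h
      subst h
      simp
    · simp [pvIdx, hc] at h
      obtain ⟨j', hj', rfl⟩ := h
      obtain ⟨hd, hm, hlt⟩ := ih j' hj'
      refine ⟨?_, ?_, ?_⟩
      · simpa using congrArg (c :: ·) hd
      · simp [hm, Ne.symm hc]
      · simp; omega

-- pvFindQuote characterisations
theorem pvFindQuote_none (l : List Char) (h : pvFindQuote l = none) :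
    '"' ∉ l ∧ '\'' ∉ l := by
  rcases h1 : pvIdx '"' l with _ | j1 <;> rcases h2 : pvIdx '\'' l with _ | j2 <;>
    simp [pvFindQuote, h1, h2] at h
  · exact ⟨(pvIdx_none_iff _ _).mp h1, (pvIdx_none_iff _ _).mp h2⟩
  · split at h <;> simp at h

theorem pvFindQuote_some (l : List Char) (j : Nat) (q : Char) (h : pvFindQuote l = some (j, q)) :
    (q = '"' ∨ q = '\'') ∧ l = l.take j ++ q :: l.drop (j + 1) ∧
      '"' ∉ l.take j ∧ '\'' ∉ l.take j := by
  rcases h1 : pvIdx '"' l with _ | j1 <;> rcases h2 : pvIdx '\'' l with _ | j2 <;>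
    simp [pvFindQuote, h1, h2] at h
  · obtain ⟨rfl, rfl⟩ := h
    obtain ⟨hd, hm, _⟩ := pvIdx_some_decomp _ l _ h2
    exact ⟨Or.inr rfl, hd, fun hx => (pvIdx_none_iff _ _).mp h1 (List.take_subset _ _ hx), hm⟩
  · obtain ⟨rfl, rfl⟩ := h
    obtain ⟨hd, hm, _⟩ := pvIdx_some_decomp _ l _ h1
    exact ⟨Or.inl rfl, hd, hm, fun hx => (pvIdx_none_iff _ _).mp h2 (List.take_subset _ _ hx)⟩
  · by_cases hlt : j1 < j2
    · rw [if_pos hlt] at h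
      obtain ⟨rfl, rfl⟩ := h
      obtain ⟨hd, hm, _⟩ := pvIdx_some_decomp _ l _ h1
      obtain ⟨_, hm2, _⟩ := pvIdx_some_decomp _ l _ h2
      exact ⟨Or.inl rfl, hd, hm, fun hx => hm2 (List.take_subset_take_left l (by omega) hx)⟩
    · rw [if_neg hlt] at h
      obtain ⟨rfl, rfl⟩ := h
      obtain ⟨hd, hm, _⟩ := pvIdx_some_decomp _ l _ h2
      obtain ⟨_, hm1, _⟩ := pvIdx_some_decomp _ l _ h1
      exact ⟨Or.inr rfl, hd, fun hx => hm1 (List.take_subset_take_left l (by omega) hx), hm⟩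

-- A's loop over a quote-free prefix just tallies braces
theorem loopA_prefix : ∀ (u m : List Char) (depth : Int) (sc : Option Char),
    '"' ∉ u → '\'' ∉ u →
    pvLoopA (u ++ m) depth false sc = pvLoopA m (depth + pvCountB u) false sc := by
  intro u
  induction u with
  | nil => intro m depth sc _ _; simp [pvCountB]
  | cons c u ih =>
    intro m depth sc h1 h2
    simp at h1 h2
    have hcq : ¬ (c = '"' ∨ c = '\'') := by
      rintro (rfl | rfl)
      · exact h1.1 rfl
      · exact h2.1 rfl
    rw [List.cons_append]
    simp only [pvLoopA]
    rw [if_pos trivial, if_neg hcq]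
    by_cases hb1 : c = '{'
    · subst hb1
      rw [if_pos rfl, ih m _ sc h1.2 h2.2]
      have hd : depth + 1 + pvCountB u = depth + pvCountB ('{' :: u) := by
        simp [pvCountB]
        ring
      rw [hd]
    · rw [if_neg hb1]
      by_cases hb2 : c = '}'
      · subst hb2
        rw [if_pos rfl, ih m _ sc h1.2 h2.2]
        have hd : depth - 1 + pvCountB u = depth + pvCountB ('}' :: u) := by
          simp [pvCountB]
          ring
        rw [hd]
      · rw [if_neg hb2, ih m _ sc h1.2 h2.2]
        have hd : depth + pvCountB u = depth + pvCountB (c :: u) := by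
          simp [pvCountB, hb1, hb2]
        rw [hd]

-- trailing-backslash-run facts
theorem pvLeadBS_le_length : ∀ (v : List Char), pvLeadBS v ≤ v.length := by
  intro v
  induction v with
  | nil => simp [pvLeadBS]
  | cons c t ih =>
    rw [pvLeadBS]
    split <;> simp only [List.length_cons] <;> omega

theorem pvLeadBS_append_single (v : List Char) (c : Char) :
    pvLeadBS (v ++ [c]) = if pvLeadBS v = v.length ∧ c = '\\' then v.length + 1 else pvLeadBS v := by
  induction v with
  | nil =>
    by_cases hc : c = '\\' <;> simp [pvLeadBS, hc]
  | cons a v ih =>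
    by_cases ha : a = '\\'
    · subst ha
      rw [List.cons_append, pvLeadBS, if_pos rfl, ih, pvLeadBS, if_pos rfl]
      by_cases hf : pvLeadBS v = v.length ∧ c = '\\'
      · rw [if_pos hf]
        have hc : pvLeadBS v + 1 = (v.length + 1 : Nat) ∧ c = '\\' := ⟨by omega, hf.2⟩
        rw [if_pos (by simpa using hc)]
        simp
      · rw [if_neg hf]
        have hnc : ¬ (pvLeadBS v + 1 = ('\\' :: v).length ∧ c = '\\') := by
          rintro ⟨he, hc⟩
          simp at he
          exact hf ⟨he, hc⟩
        rw [if_neg hnc]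
    · rw [List.cons_append, pvLeadBS, if_neg ha, pvLeadBS, if_neg ha]
      have hnc : ¬ ((0 : Nat) = (a :: v).length ∧ c = '\\') := by
        rintro ⟨he, _⟩
        simp at he
      rw [if_neg hnc]

theorem pvTrailBS_cons_ne (c : Char) (u : List Char) (hc : c ≠ '\\') :
    pvTrailBS (c :: u) = pvTrailBS u := by
  unfold pvTrailBS
  rw [List.reverse_cons, pvLeadBS_append_single]
  simp [hc]

theorem pvTrailBS_cons_cons_parity (x : Char) (u : List Char) :
    pvTrailBS ('\\' :: x :: u) % 2 = pvTrailBS u % 2 := by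
  unfold pvTrailBS
  rw [List.reverse_cons, List.reverse_cons, pvLeadBS_append_single, pvLeadBS_append_single]
  have hle := pvLeadBS_le_length u.reverse
  by_cases hf : pvLeadBS u.reverse = u.reverse.length ∧ x = '\\'
  · rw [if_pos hf]
    have hc : u.reverse.length + 1 = (u.reverse ++ [x]).length ∧ ('\\' : Char) = '\\' := by
      simp
    rw [if_pos hc, hf.1]
    simp
    omega
  · rw [if_neg hf]
    have hne : pvLeadBS u.reverse ≠ (u.reverse ++ [x]).length := by
      simp only [List.length_append, List.length_reverse, List.length_cons, List.length_nil]
      simp only [List.length_reverse] at hle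
      omega
    rw [if_neg (by rintro ⟨he, _⟩; exact hne he)]

-- shift lemmas for pvFindClose
theorem pvFindClose_shift1 (q : Char) : ∀ (n : Nat) (s : List Char) (k : Nat) (c : Char),
    s.length - k ≤ n → c ≠ '\\' →
    pvFindClose q (c :: s) (k + 1) = (pvFindClose q s k).map (· + 1) := by
  intro n
  induction n with
  | zero =>
    intro s k c hn _
    have hdrop : s.drop k = [] := by
      apply List.drop_eq_nil_of_le
      omega
    rw [pvFindClose_none q _ _ (by simp [hdrop, pvIdx] : pvIdx q (List.drop (k + 1) (c :: s)) = none), pvFindClose_none q s k (by simp [hdrop, pvIdx])]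
    simp
  | succ n ih =>
    intro s k c hn hc
    have hds : (c :: s).drop (k + 1) = s.drop k := by simp
    rcases hidx : pvIdx q (s.drop k) with _ | j
    · rw [pvFindClose_none q (c :: s) (k + 1) (by rw [hds, hidx]), pvFindClose_none q s k hidx]
      simp
    · have hjlt : j < s.length - k := by
        have := pvIdx_lt_length q (s.drop k) j hidx
        simpa using this
      rw [pvFindClose_some q (c :: s) (k + 1) j (by rw [hds, hidx]), pvFindClose_some q s k j hidx]
      have harith : k + 1 + j = (k + j) + 1 := by omega
      have htake : (c :: s).take (k + 1 + j) = c :: s.take (k + j) := by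
        rw [harith, List.take_succ_cons]
      have hpar : pvTrailBS ((c :: s).take (k + 1 + j)) % 2 = pvTrailBS (s.take (k + j)) % 2 := by
        rw [htake, pvTrailBS_cons_ne c _ hc]
      by_cases hev : pvTrailBS (s.take (k + j)) % 2 = 0
      · rw [if_pos (by omega), if_pos hev]
        simp
        omega
      · rw [if_neg (by omega), if_neg hev]
        have hrec := ih s (k + j + 1) c (by omega) hc
        have harith2 : k + 1 + j + 1 = (k + j + 1) + 1 := by omega
        rw [harith2, hrec]

theorem pvFindClose_shift2 (q : Char) : ∀ (n : Nat) (t : List Char) (k : Nat) (x : Char),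
    t.length - k ≤ n →
    pvFindClose q ('\\' :: x :: t) (k + 2) = (pvFindClose q t k).map (· + 2) := by
  intro n
  induction n with
  | zero =>
    intro t k x hn
    have hdrop : t.drop k = [] := by
      apply List.drop_eq_nil_of_le
      omega
    rw [pvFindClose_none q _ _ (by simp [hdrop, pvIdx] : pvIdx q (List.drop (k + 2) ('\\' :: x :: t)) = none), pvFindClose_none q t k (by simp [hdrop, pvIdx])]
    simp
  | succ n ih =>
    intro t k x hn
    have hds : ('\\' :: x :: t).drop (k + 2) = t.drop k := by simp
    rcases hidx : pvIdx q (t.drop k) with _ | j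
    · rw [pvFindClose_none q ('\\' :: x :: t) (k + 2) (by rw [hds, hidx]), pvFindClose_none q t k hidx]
      simp
    · have hjlt : j < t.length - k := by
        have := pvIdx_lt_length q (t.drop k) j hidx
        simpa using this
      rw [pvFindClose_some q ('\\' :: x :: t) (k + 2) j (by rw [hds, hidx]), pvFindClose_some q t k j hidx]
      have harith : k + 2 + j = ((k + j) + 1) + 1 := by omega
      have htake : ('\\' :: x :: t).take (k + 2 + j) = '\\' :: x :: t.take (k + j) := by
        rw [harith, List.take_succ_cons, List.take_succ_cons]
      have hpar : pvTrailBS (('\\' :: x :: t).take (k + 2 + j)) % 2 = pvTrailBS (t.take (k + j)) % 2 := by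
        rw [htake, pvTrailBS_cons_cons_parity]
      by_cases hev : pvTrailBS (t.take (k + j)) % 2 = 0
      · rw [if_pos (by omega), if_pos hev]
        simp
        omega
      · rw [if_neg (by omega), if_neg hev]
        have hrec := ih t (k + j + 1) x (by omega)
        have harith2 : k + 2 + j + 1 = (k + j + 1) + 2 := by omega
        rw [harith2, hrec]

-- the find/parity close-finder computes exactly the skip machine
theorem pvFindClose_eq_skipM (q : Char) (hq : q ≠ '\\') : ∀ (n : Nat) (l : List Char),
    l.length ≤ n → pvFindClose q l 0 = pvSkipM q l := by
  intro n
  induction n with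
  | zero =>
    intro l hl
    have : l = [] := List.length_eq_zero_iff.mp (Nat.le_zero.mp hl)
    subst this
    rw [pvFindClose_none q _ _ (by simp [pvIdx])]
    simp [pvSkipM]
  | succ n ih =>
    intro l hl
    cases l with
    | nil =>
      rw [pvFindClose_none q _ _ (by simp [pvIdx])]
      simp [pvSkipM]
    | cons c t =>
      have ht : t.length ≤ n := by simpa using Nat.succ_le_succ_iff.mp hl
      by_cases h2 : c = q
      · -- the very first character closes the string
        have hskip : pvSkipM q (c :: t) = some 1 := by
          simp only [pvSkipM]
          simp [h2, hq]
        rw [pvFindClose_some q (c :: t) 0 0 (by simp [pvIdx, h2]), hskip]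
        simp [pvTrailBS, pvLeadBS]
      · by_cases hcb : c = '\\'
        · subst hcb
          cases t with
          | nil =>
            -- l = ['\'], a lone trailing backslash: unterminated either way
            rw [pvFindClose_none q ['\\'] 0 (by simp [pvIdx, h2])]
            simp only [pvSkipM]
            simp [h2]
          | cons x t' =>
            have hskip : pvSkipM q ('\\' :: x :: t') = (pvSkipM q t').map (· + 2) := by
              simp only [pvSkipM]
              simp
            have ht' : t'.length ≤ n := by
              simp at ht
              omega
            rw [hskip, ← ih t' ht']
            by_cases hx : x = q
            · -- immediately escaped quote
              rw [pvFindClose_some q ('\\' :: x :: t') 0 1 (by simp [pvIdx, h2, hx])]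
              have hpar : pvTrailBS (('\\' :: x :: t').take (0 + 1)) % 2 = 1 := by
                simp [pvTrailBS, pvLeadBS]
              rw [if_neg (by omega)]
              have hrec := pvFindClose_shift2 q t'.length t' 0 x (by omega)
              have harith : 0 + 1 + 1 = 0 + 2 := by omega
              rw [harith, hrec]
            · rcases hit : pvIdx q t' with _ | j
              · rw [pvFindClose_none q ('\\' :: x :: t') 0 (by simp [pvIdx, h2, hx, hit]),
                  pvFindClose_none q t' 0 (by simpa using hit)]
                simp
              · rw [pvFindClose_some q ('\\' :: x :: t') 0 (j + 2) (by simp [pvIdx, h2, hx, hit]),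
                  pvFindClose_some q t' 0 j (by simpa using hit)]
                have harith : 0 + (j + 2) = ((0 + j) + 1) + 1 := by omega
                have htake : ('\\' :: x :: t').take (0 + (j + 2)) = '\\' :: x :: t'.take (0 + j) := by
                  rw [harith, List.take_succ_cons, List.take_succ_cons]
                have hpar : pvTrailBS (('\\' :: x :: t').take (0 + (j + 2))) % 2
                    = pvTrailBS (t'.take (0 + j)) % 2 := by
                  rw [htake, pvTrailBS_cons_cons_parity]
                by_cases hev : pvTrailBS (t'.take (0 + j)) % 2 = 0
                · rw [if_pos (by omega), if_pos hev]
                  simp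
                · rw [if_neg (by omega), if_neg hev]
                  have hrec := pvFindClose_shift2 q t'.length t' (0 + j + 1) x (by omega)
                  have harith2 : 0 + (j + 2) + 1 = (0 + j + 1) + 2 := by omega
                  rw [harith2, hrec]
        · -- ordinary character inside the string
          have hskip : pvSkipM q (c :: t) = (pvSkipM q t).map (· + 1) := by
            simp only [pvSkipM]
            simp [hcb, h2]
          rw [hskip, ← ih t ht]
          rcases hit : pvIdx q t with _ | j
          · rw [pvFindClose_none q (c :: t) 0 (by simp [pvIdx, h2, hit]),
              pvFindClose_none q t 0 (by simpa using hit)]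
            simp
          · rw [pvFindClose_some q (c :: t) 0 (j + 1) (by simp [pvIdx, h2, hit]),
              pvFindClose_some q t 0 j (by simpa using hit)]
            have harith : 0 + (j + 1) = (0 + j) + 1 := by omega
            have htake : (c :: t).take (0 + (j + 1)) = c :: t.take (0 + j) := by
              rw [harith, List.take_succ_cons]
            have hpar : pvTrailBS ((c :: t).take (0 + (j + 1))) = pvTrailBS (t.take (0 + j)) := by
              rw [htake, pvTrailBS_cons_ne c _ hcb]
            by_cases hev : pvTrailBS (t.take (0 + j)) % 2 = 0
            · rw [if_pos (by omega), if_pos hev]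
              simp
            · rw [if_neg (by omega), if_neg hev]
              have hrec := pvFindClose_shift1 q t.length t (0 + j + 1) c (by omega) hcb
              have harith2 : 0 + (j + 1) + 1 = (0 + j + 1) + 1 := by omega
              rw [harith2, hrec]

-- main agreement
theorem loop_agree : ∀ (n : Nat) (l : List Char), l.length ≤ n → ∀ (depth : Int) (sc : Option Char),
    pvLoopA l depth false sc = pvLoopB l depth := by
  intro n
  induction n with
  | zero =>
    intro l hl
    have : l = [] := List.length_eq_zero_iff.mp (Nat.le_zero.mp hl)
    subst this
    intro depth sc
    rw [pvLoopB_eq]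
    simp [pvLoopA, pvFindQuote, pvIdx, pvCountB]
  | succ n ih =>
    intro l hl depth sc
    rw [pvLoopB_eq]
    rcases hfq : pvFindQuote l with _ | ⟨j, q⟩
    · obtain ⟨h1, h2⟩ := pvFindQuote_none l hfq
      have := loopA_prefix l [] depth sc h1 h2
      simpa [pvLoopA] using this
    · obtain ⟨hq, hdec, hq1, hq2⟩ := pvFindQuote_some l j q hfq
      have hqbs : q ≠ '\\' := by
        rcases hq with rfl | rfl <;> decide
      conv_lhs => rw [hdec]
      rw [loopA_prefix _ _ depth sc hq1 hq2]
      have hstep : pvLoopA (q :: l.drop (j + 1)) (depth + pvCountB (l.take j)) false sc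
          = pvLoopA (l.drop (j + 1)) (depth + pvCountB (l.take j)) true (some q) := by
        rcases hq with rfl | rfl <;> (simp only [pvLoopA]; simp)
      have hdlen : (l.drop (j + 1)).length ≤ n := by
        have hpos : 0 < l.length := by
          cases l
          · simp [pvFindQuote, pvIdx] at hfq
          · simp
        simp
        omega
      rw [hstep, loopA_inString n _ hdlen _ q, ← pvFindClose_eq_skipM q hqbs n _ hdlen]
      rcases hcl : pvFindClose q (l.drop (j + 1)) 0 with _ | e
      · simp [hcl]
      · have hlen2 : (List.drop (j + 1 + e) l).length ≤ n := by
          have hpos : 0 < l.length := by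
            cases l
            · simp [pvFindQuote, pvIdx] at hfq
            · simp
          simp
          omega
        simp [hcl]
        exact ih _ hlen2 _ (some q)

-- ===== VERDICT (by name: the statement is the Claim_ definition above) =====
theorem count_brace_depth_py_spec : Claim_equal_count_brace_depth_py := by
  intro text _
  unfold Spec_count_brace_depth_py count_brace_depth_py count_brace_depth_py_alt
  exact loop_agree text.toList.length text.toList le_rfl 0 none
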